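-- pv_equiv track=rewrite | github.com/pypi-data/pypi-mirror-168 | packages/trafficshaper/trafficshaper-0.1.0.tar.gz/trafficshaper-0.1.0/trafficshaper.py | commentify
-- ===== SOURCE A (Python) =====
-- def commentify(txt):
--     ret = []
--     for i, line in enumerate(txt.split("\n")):
--         if i == 0:
--             ret.append(line)
--         else:
--             ret.append("#   %s" % line)
--     return "\n".join(ret)
-- ===== SOURCE B (Python) =====
-- def commentify(txt):
--     return txt.replace("\n", "\n#   ")
-- ===== Notes on version B (the rewrite author's own statement) =====
-- stated objective: simpler
-- what changed: Replaces the split/enumerate/accumulate/join loop with a single string replacement of each newline by the newline-plus-marker string.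
import Mathlib
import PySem

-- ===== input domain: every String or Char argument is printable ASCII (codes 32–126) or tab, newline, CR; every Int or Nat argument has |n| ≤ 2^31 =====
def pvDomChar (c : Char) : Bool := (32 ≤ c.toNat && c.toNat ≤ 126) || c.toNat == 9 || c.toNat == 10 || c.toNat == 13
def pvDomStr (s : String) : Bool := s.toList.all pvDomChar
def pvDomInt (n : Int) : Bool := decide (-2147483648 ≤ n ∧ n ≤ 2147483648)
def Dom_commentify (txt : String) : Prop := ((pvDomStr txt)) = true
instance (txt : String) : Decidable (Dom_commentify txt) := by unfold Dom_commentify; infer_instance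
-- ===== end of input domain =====

-- B replaces A's split/enumerate/accumulate/join loop with one replacement of '\n' by '\n#   ' (simpler; return value equal).

-- ===== PORT A =====
-- ret = []; for i, line in enumerate(txt.split("\n")): ret.append(line if i == 0 else "#   %s" % line); return "\n".join(ret)
def commentify (txt : String) : String :=
  let ret : List (List Char) :=
    (PySem.List.enumerate (PySem.Chars.splitOn txt.toList "\n".toList) 0).foldl
      (fun ret p => if p.1 == 0 then ret ++ [p.2] else ret ++ ["#   ".toList ++ p.2]) []
  String.ofList (PySem.Chars.join "\n".toList ret)

-- ===== PORT B =====
-- return txt.replace("\n", "\n#   ")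
def commentify_alt (txt : String) : String := PySem.Str.replace txt "\n" "\n#   "

-- ===== PRECONDITION & SPEC =====
def Spec_commentify (txt : String) (out : String) : Prop := out = commentify_alt txt
instance (txt : String) (out : String) : Decidable (Spec_commentify txt out) := by unfold Spec_commentify; infer_instance

-- ===== CLAIM (what is proved, stated in full; the proofs are below) =====
def Claim_equal_commentify : Prop := ∀ (txt : String), Dom_commentify txt → Spec_commentify txt (commentify txt)

-- ===== LEMMAS AND PROOFS =====

-- the pieces of a char list between its '\n' separators
def splitNL : List Char → List (List Char)
  | [] => [[]]
  | c :: t => if c = '\n' then [] :: splitNL t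
              else match splitNL t with
                   | [] => [[c]]
                   | h :: r => (c :: h) :: r

theorem splitNL_ne_nil (l : List Char) : splitNL l ≠ [] := by
  cases l with
  | nil => simp [splitNL]
  | cons c t =>
    simp only [splitNL]
    split
    · simp
    · split <;> simp

-- prepend a prefix onto the first piece
def headCons (pre : List Char) : List (List Char) → List (List Char)
  | [] => [pre]
  | h :: r => (pre ++ h) :: r

-- per-character form of the newline replacement
def nlExpand (c : Char) : List Char := if c = '\n' then "\n#   ".toList else [c]

theorem splitOn_go_eq (fuel : Nat) (l cur : List Char) (acc : List (List Char))
    (hf : l.length < fuel) :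
    PySem.Chars.splitOn.go ['\n'] fuel l cur acc
      = acc.reverse ++ headCons cur.reverse (splitNL l) := by
  induction fuel generalizing l cur acc with
  | zero => omega
  | succ fuel ih =>
    cases l with
    | nil =>
      rw [PySem.Chars.splitOn.go]
      simp [splitNL, headCons]
      omega
    | cons c t =>
      simp only [List.length_cons] at hf
      by_cases hc : c = '\n'
      · subst hc
        have step : PySem.Chars.splitOn.go ['\n'] (fuel + 1) ('\n' :: t) cur acc
            = PySem.Chars.splitOn.go ['\n'] fuel t [] (cur.reverse :: acc) := by
          rw [PySem.Chars.splitOn.go]; simp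
        rw [step, ih t [] (cur.reverse :: acc) (by omega)]
        obtain ⟨h', t', ht⟩ := List.exists_cons_of_ne_nil (splitNL_ne_nil t)
        simp [splitNL, ht, headCons]
      · have step : PySem.Chars.splitOn.go ['\n'] (fuel + 1) (c :: t) cur acc
            = PySem.Chars.splitOn.go ['\n'] fuel t (c :: cur) acc := by
          rw [PySem.Chars.splitOn.go]
          rw [if_neg (by simp; exact fun e => hc e.symm)]
        rw [step, ih t (c :: cur) acc (by omega)]
        obtain ⟨h', t', ht⟩ := List.exists_cons_of_ne_nil (splitNL_ne_nil t)
        simp [splitNL, hc, ht, headCons]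

theorem splitOn_nl_eq (l : List Char) :
    PySem.Chars.splitOn l ['\n'] = splitNL l := by
  rw [PySem.Chars.splitOn, splitOn_go_eq (l.length + 1) l [] [] (by omega)]
  obtain ⟨h', t', ht⟩ := List.exists_cons_of_ne_nil (splitNL_ne_nil l)
  simp [ht, headCons]

theorem replace_go_eq (fuel : Nat) (l acc : List Char) (hf : l.length ≤ fuel) :
    PySem.Chars.replace.go ['\n'] "\n#   ".toList fuel l acc
      = acc.reverse ++ l.flatMap nlExpand := by
  induction fuel generalizing l acc with
  | zero =>
    have : l = [] := List.eq_nil_of_length_eq_zero (by omega)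
    subst this
    rw [PySem.Chars.replace.go]
    simp
  | succ fuel ih =>
    cases l with
    | nil =>
      rw [PySem.Chars.replace.go]
      simp
      omega
    | cons c t =>
      simp only [List.length_cons] at hf
      by_cases hc : c = '\n'
      · subst hc
        have step : PySem.Chars.replace.go ['\n'] "\n#   ".toList (fuel + 1) ('\n' :: t) acc
            = PySem.Chars.replace.go ['\n'] "\n#   ".toList fuel t ("\n#   ".toList.reverse ++ acc) := by
          rw [PySem.Chars.replace.go]; simp
        rw [step, ih t _ (by omega)]
        simp [nlExpand, List.flatMap_cons]
      · have step : PySem.Chars.replace.go ['\n'] "\n#   ".toList (fuel + 1) (c :: t) acc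
            = PySem.Chars.replace.go ['\n'] "\n#   ".toList fuel t (c :: acc) := by
          rw [PySem.Chars.replace.go]
          rw [if_neg (by simp; exact fun e => hc e.symm)]
        rw [step, ih t (c :: acc) (by omega)]
        simp [nlExpand, hc, List.flatMap_cons]

-- the tail of the fold: every index is nonzero, so every piece gets the marker
theorem foldl_tail_eq (r : List (List Char)) (acc : List (List Char)) (s : Int) (hs : 1 ≤ s) :
    (PySem.List.enumerate r s).foldl
        (fun ret p => if p.1 == 0 then ret ++ [p.2] else ret ++ ["#   ".toList ++ p.2]) acc
      = acc ++ r.map (fun e => "#   ".toList ++ e) := by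
  induction r generalizing acc s with
  | nil => simp [PySem.List.enumerate_nil]
  | cons x xs ih =>
    rw [PySem.List.enumerate_cons]
    have hz : (s == 0) = false := by simp; omega
    simp only [List.foldl_cons, hz, Bool.false_eq_true, if_neg, not_false_iff]
    rw [ih _ (s + 1) (by omega)]
    simp

-- joining the marked pieces of l is the per-character expansion of l
theorem join_marked_eq (l : List Char) (h : List Char) (t : List (List Char)) (hsplit : splitNL l = h :: t) :
    h ++ t.flatMap (fun e => "\n#   ".toList ++ e) = l.flatMap nlExpand := by
  induction l generalizing h t with
  | nil =>
    simp only [splitNL] at hsplit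
    cases hsplit
    simp
  | cons c rest ih =>
    obtain ⟨h', t', ht⟩ := List.exists_cons_of_ne_nil (splitNL_ne_nil rest)
    by_cases hc : c = '\n'
    · subst hc
      simp only [splitNL, if_pos, ht] at hsplit
      cases hsplit
      have hrec := ih h' t' ht
      simp only [List.nil_append, List.flatMap_cons]
      rw [← hrec]
      simp [nlExpand]
    · simp only [splitNL, hc, if_neg, not_false_iff, ht] at hsplit
      cases hsplit
      have hrec := ih h' _ ht
      rw [List.flatMap_cons]
      have hx : nlExpand c = [c] := by simp [nlExpand, hc]
      rw [hx, ← hrec]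
      simp

theorem join_intercalate (h : List Char) (t : List (List Char)) :
    PySem.Chars.join ['\n'] (h :: t.map (fun e => "#   ".toList ++ e))
      = h ++ t.flatMap (fun e => "\n#   ".toList ++ e) := by
  induction t generalizing h with
  | nil => simp [PySem.Chars.join, List.intercalate]
  | cons x xs ih =>
    simp only [List.map_cons]
    rw [PySem.Chars.join_cons_cons, ih]
    have : "\n#   ".toList = '\n' :: "#   ".toList := by decide
    simp [List.flatMap_cons, this]

-- ===== VERDICT (by name: the statement is the Claim_ definition above) =====
theorem commentify_spec : Claim_equal_commentify := by
  intro txt _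
  unfold Spec_commentify commentify commentify_alt
  rw [PySem.Str.replace]
  have hnl : "\n".toList = ['\n'] := by decide
  simp only [hnl]
  rw [splitOn_nl_eq]
  obtain ⟨h, t, ht⟩ := List.exists_cons_of_ne_nil (splitNL_ne_nil txt.toList)
  rw [ht, PySem.List.enumerate_cons]
  simp only [List.foldl_cons, beq_self_eq_true, if_pos, List.nil_append]
  rw [foldl_tail_eq t [h] (0 + 1) (by omega)]
  rw [List.singleton_append, join_intercalate, join_marked_eq txt.toList h t ht]
  rw [PySem.Chars.replace]
  simp only [List.isEmpty_cons, Bool.false_eq_true, if_neg, not_false_iff]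
  rw [replace_go_eq txt.toList.length txt.toList [] (le_refl _)]
  simp
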